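-- pv_equiv track=rewrite | github.com/jkeevk/stepik_random | for_test(not_mine).py | key_len_word
-- ===== SOURCE A (Python) =====
-- def key_len_word(text):   # Модуль возвращающий список, равные длине каждого слова строки, не считая знаков препинания
--     final_text = ''
--     final_list = []
--     for i in text:
--         if i.isalpha() or i.isspace():
--             final_text += i
--     final_text = final_text.split()
--     for i in final_text:
--         final_list.append(len(i))
--     return final_list
-- ===== SOURCE B (Python) =====
-- def key_len_word(text):
--     res = []
--     current = 0
--     for i in text:
--         if i.isspace():
--             if current > 0:
--                 res.append(current)
--                 current = 0
--         elif i.isalpha():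
--             current += 1
--     if current > 0:
--         res.append(current)
--     return res
-- ===== Notes on version B (the rewrite author's own statement) =====
-- stated objective: alternative
-- what changed: Replaces A's three-pass pipeline (filter into an intermediate string, split it into words, map len over the word list) with a single pass over the text maintaining only an integer word-length counter and the result list; punctuation is skipped without flushing so letters joined by punctuation still merge.
import Mathlib
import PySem

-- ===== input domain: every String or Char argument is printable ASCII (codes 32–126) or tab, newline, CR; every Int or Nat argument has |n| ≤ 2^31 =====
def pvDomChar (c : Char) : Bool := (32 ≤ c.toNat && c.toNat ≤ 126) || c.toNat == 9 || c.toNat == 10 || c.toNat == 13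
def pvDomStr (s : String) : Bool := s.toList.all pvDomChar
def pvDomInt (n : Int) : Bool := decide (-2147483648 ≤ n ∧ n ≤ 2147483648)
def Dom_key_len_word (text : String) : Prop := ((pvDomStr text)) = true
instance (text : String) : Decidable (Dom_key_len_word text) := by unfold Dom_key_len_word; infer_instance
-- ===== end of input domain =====

-- B replaces A's three passes (filter to a new string, split, map len) by one pass with a
-- word-length counter: a structurally different single-pass algorithm, same O(n) cost.


-- ===== PORT A =====
def key_len_word (text : String) : List Int :=
  let final_text : List Char :=
    text.toList.foldl
      (fun acc i => if PySem.Chars.isalpha i || PySem.Chars.isspace i then acc ++ [i] else acc) []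
  let words := PySem.Chars.split₀ final_text
  words.foldl (fun acc w => acc ++ [((w.length : Nat) : Int)]) []

-- ===== PORT B =====
def key_len_word_alt (text : String) : List Int :=
  let p := text.toList.foldl
    (fun (p : List Int × Int) i =>
      if PySem.Chars.isspace i then
        (if p.2 > 0 then (p.1 ++ [p.2], 0) else p)
      else if PySem.Chars.isalpha i then (p.1, p.2 + 1)
      else p)
    ([], 0)
  if p.2 > 0 then p.1 ++ [p.2] else p.1

-- ===== PRECONDITION & SPEC =====
def Spec_key_len_word (text : String) (out : List Int) : Prop := out = key_len_word_alt text
instance (text : String) (out : List Int) : Decidable (Spec_key_len_word text out) := by unfold Spec_key_len_word; infer_instance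

-- ===== CLAIM (what is proved, stated in full; the proofs are below) =====
def Claim_equal_key_len_word : Prop := ∀ (text : String), Dom_key_len_word text → Spec_key_len_word text (key_len_word text)

-- ===== LEMMAS AND PROOFS =====

-- A's first loop builds exactly the filtered list
theorem pv_filter_loop (l : List Char) (init : List Char) :
    l.foldl (fun acc i => if PySem.Chars.isalpha i || PySem.Chars.isspace i then acc ++ [i] else acc) init
      = init ++ l.filter (fun i => PySem.Chars.isalpha i || PySem.Chars.isspace i) := by
  induction l generalizing init with
  | nil => simp
  | cons c rest ih =>
    rw [List.foldl_cons, ih, List.filter_cons]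
    by_cases h : (PySem.Chars.isalpha c || PySem.Chars.isspace c) = true
    · simp [h]
    · simp [h]

-- A's second loop is a map
theorem pv_map_loop (ws : List (List Char)) (init : List Int) :
    ws.foldl (fun acc w => acc ++ [((w.length : Nat) : Int)]) init
      = init ++ ws.map (fun w => ((w.length : Nat) : Int)) := by
  induction ws generalizing init with
  | nil => simp
  | cons w rest ih => simp [ih]

-- main invariant: B's state machine on l equals split₀.go on the filtered l
theorem pv_main (l : List Char) (cur : List Char) (acc : List (List Char)) :
    (let q := l.foldl
        (fun (p : List Int × Int) i =>
          if PySem.Chars.isspace i then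
            (if p.2 > 0 then (p.1 ++ [p.2], 0) else p)
          else if PySem.Chars.isalpha i then (p.1, p.2 + 1)
          else p)
        (acc.reverse.map (fun w => ((w.length : Nat) : Int)), (cur.length : Int));
      if q.2 > 0 then q.1 ++ [q.2] else q.1)
      = (PySem.Chars.split₀.go
          (l.filter (fun i => PySem.Chars.isalpha i || PySem.Chars.isspace i)) cur acc).map
          (fun w => ((w.length : Nat) : Int)) := by
  induction l generalizing cur acc with
  | nil =>
    simp only [List.filter_nil, List.foldl_nil, PySem.Chars.split₀.go]
    by_cases h : cur.isEmpty
    · simp_all [List.isEmpty_iff]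
    · have hne : cur ≠ [] := by simpa [List.isEmpty_iff] using h
      simp [h, hne, Int.natCast_pos, List.length_pos_iff]
  | cons c rest ih =>
    by_cases hs : PySem.Chars.isspace c = true
    · -- space: kept by the filter, go flushes; B flushes when counter > 0
      by_cases hc : cur = []
      · subst hc
        simpa [List.filter_cons, hs, PySem.Chars.split₀.go] using ih [] acc
      · have hemp : cur.isEmpty = false := by simp [hc]
        have := ih [] (cur.reverse :: acc)
        simp only [List.reverse_cons, List.map_append, List.map_cons, List.map_nil,
          List.length_reverse, List.length_nil, Nat.cast_zero] at this
        simpa [List.filter_cons, hs, hemp, Int.natCast_pos, List.length_pos_iff, hc,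
          PySem.Chars.split₀.go] using this
    · by_cases ha : PySem.Chars.isalpha c = true
      · -- letter: counter increments, go extends cur
        have := ih (c :: cur) acc
        simp only [List.length_cons] at this
        simpa [List.filter_cons, hs, ha, PySem.Chars.split₀.go, Nat.cast_add, Nat.cast_one,
          add_comm] using this
      · -- punctuation: dropped by the filter, no-op for B
        simpa [List.filter_cons, hs, ha] using ih cur acc

-- ===== VERDICT (by name: the statement is the Claim_ definition above) =====
theorem key_len_word_spec : Claim_equal_key_len_word := by
  intro text _
  unfold Spec_key_len_word key_len_word key_len_word_alt PySem.Chars.split₀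
  simp only [pv_filter_loop, pv_map_loop, List.nil_append]
  simpa using (pv_main text.toList [] []).symm
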